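-- pv_equiv track=rewrite | github.com/majung2/CTpractice | python/2020하반기/2020쿠팡테크캠퍼스리쿠르팅/01.py | solution
-- ===== SOURCE A (Python) =====
-- def turn(j, N):
--     k = 1
--     while(N):
--         if N%j != 0:
--             k *= (N%j)
--         N //= j
--     return k
--
-- def solution(N):
--     answer = []
--     j, k = 2, 0
--
--     for i in range(2, 10):
--         if turn(i, N) >= k:
--             j, k = i, turn(i, N)
--
--     answer = [j, k]
--     return answer
-- ===== SOURCE B (Python) =====
-- def digitproduct(n, base):
--     # most-significant-digit-first: grow the top power of the base, then peel
--     # digits from the top by division/subtraction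
--     p = 1
--     while p * base <= n:
--         p *= base
--     prod = 1
--     while n > 0:
--         d = n // p
--         if d:
--             prod *= d
--         n -= d * p
--         p //= base
--     return prod
--
--
-- def solution(N):
--     prod, base = max((digitproduct(N, b), b) for b in range(2, 10))
--     return [base, prod]
-- ===== Notes on version B (the rewrite author's own statement) =====
-- stated objective: alternative
-- what changed: B computes each base's nonzero-digit product most-significant-first (grow the top power of the base by multiplication, then peel digits from the top by division and subtraction) instead of A's least-significant-first mod/div accumulating loop, and selects the base by max over (product, base) tuples instead of A's manual best-so-far scan.
import Mathlib
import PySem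

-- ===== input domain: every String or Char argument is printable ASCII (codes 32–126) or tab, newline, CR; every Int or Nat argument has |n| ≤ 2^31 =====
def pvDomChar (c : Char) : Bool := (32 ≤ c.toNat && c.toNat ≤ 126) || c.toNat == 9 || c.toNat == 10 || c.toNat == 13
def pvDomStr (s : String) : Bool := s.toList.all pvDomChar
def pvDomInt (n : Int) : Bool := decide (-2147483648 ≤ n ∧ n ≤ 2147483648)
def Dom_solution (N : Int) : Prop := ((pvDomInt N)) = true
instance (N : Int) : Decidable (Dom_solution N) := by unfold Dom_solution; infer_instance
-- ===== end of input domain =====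

-- B replaces A's least-significant-first mod/div accumulating loop by a most-significant-first
-- peel (grow the top power, then divide/subtract) and picks the base via max over (product, base)
-- pairs; objective: alternative (same cost, different algorithm).

-- termination helpers cited by the ports' recursions (named so the recursive
-- definitions carry only a reference, not an inline proof term)
theorem pv_powUp_dec (n base p : Int) (h : p * base ≤ n ∧ 2 ≤ base ∧ 1 ≤ p) :
    (n - p * base).toNat < (n - p).toNat := by
  obtain ⟨h1, h2, h3⟩ := h
  have h4 : p * 2 ≤ p * base := by nlinarith
  omega

theorem pv_floordiv_toNat_lt (n b : Int) (hn : 0 < n) (hb : 2 ≤ b) :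
    (PySem.Int.floordiv n b).toNat < n.toNat := by
  rw [PySem.Int.floordiv_eq_ediv_of_pos (by omega)]
  have hq := Int.ediv_add_emod n b
  have h0 : 0 ≤ n % b := Int.emod_nonneg n (by omega)
  have h2 : 0 ≤ n / b := Int.ediv_nonneg (by omega) (by omega)
  have h1 : n / b < n := by nlinarith
  omega

-- ===== PORT A =====
-- Python: 'while N' with N //= j; for the calls made (j ∈ [2,9]) and N > 0 the loop condition
-- is exactly 0 < N; the guard is strengthened with 2 ≤ j / 0 < N for termination
-- (Python never terminates for N < 0).
def turnGo (j N k : Int) : Int :=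
  if h : 0 < N ∧ 2 ≤ j then
    turnGo j (PySem.Int.floordiv N j)
      (if PySem.Int.mod N j ≠ 0 then k * PySem.Int.mod N j else k)
  else k
termination_by N.toNat
decreasing_by exact pv_floordiv_toNat_lt N j h.1 h.2

def turn (j N : Int) : Int := turnGo j N 1

def solution (N : Int) : List Int :=
  let r := (PySem.List.pyRange 2 10 1).foldl
    (fun (s : Int × Int) i => if turn i N ≥ s.2 then (i, turn i N) else s) (2, 0)
  [r.1, r.2]

-- ===== PORT B =====
-- Source B's first while-loop: grow p to the largest power of base that is ≤ n
-- (guard strengthened with 2 ≤ base / 1 ≤ p, true at every call, for termination)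
def powUp (n base p : Int) : Int :=
  if h : p * base ≤ n ∧ 2 ≤ base ∧ 1 ≤ p then powUp n base (p * base) else p
termination_by (n - p).toNat
decreasing_by exact pv_powUp_dec n base p h

-- Source B's second while-loop: peel the digits from the most significant end
-- (guard strengthened with 2 ≤ base / 1 ≤ p, true at every reachable state, for termination)
def peel (n p base prod : Int) : Int :=
  if h : 0 < n ∧ 2 ≤ base ∧ 1 ≤ p then
    let d := PySem.Int.floordiv n p
    peel (n - d * p) (PySem.Int.floordiv p base) base (if d ≠ 0 then prod * d else prod)
  else prod
termination_by p.toNat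
decreasing_by exact pv_floordiv_toNat_lt p base (lt_of_lt_of_le Int.zero_lt_one h.2.2) h.2.1

def digitproduct (n base : Int) : Int := peel n (powUp n base 1) base 1

-- Python's max over the (product, base) tuples of range(2,10): first element as the start,
-- strict lexicographic '>' to replace it; the list is never empty, so headI's default is unreachable.
def solution_alt (N : Int) : List Int :=
  let L := (PySem.List.pyRange 2 10 1).map (fun b => (digitproduct N b, b))
  let m := L.tail.foldl
    (fun (m : Int × Int) y => if m.1 < y.1 ∨ (m.1 = y.1 ∧ m.2 < y.2) then y else m) L.headI
  [m.2, m.1]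

-- ===== PRECONDITION & SPEC =====
-- (no Pre_: for N < 0 both Pythons loop forever; there the guarded ports return the same value,
-- so plain equivalence holds on all of Dom)
def Spec_solution (N : Int) (out : List Int) : Prop := out = solution_alt N
instance (N : Int) (out : List Int) : Decidable (Spec_solution N out) := by unfold Spec_solution; infer_instance

-- ===== CLAIM (what is proved, stated in full; the proofs are below) =====
def Claim_equal_solution : Prop := ∀ (N : Int), Dom_solution N → Spec_solution N (solution N)

-- ===== LEMMAS AND PROOFS =====

-- A's loop is multiplicative in its accumulator
theorem turnGo_mul (j N k : Int) : turnGo j N k = k * turnGo j N 1 := by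
  by_cases h : 0 < N ∧ 2 ≤ j
  · conv_lhs => rw [turnGo, dif_pos h]
    conv_rhs => rw [turnGo, dif_pos h]
    rw [turnGo_mul j (PySem.Int.floordiv N j)
        (if PySem.Int.mod N j ≠ 0 then k * PySem.Int.mod N j else k),
      turnGo_mul j (PySem.Int.floordiv N j)
        (if PySem.Int.mod N j ≠ 0 then 1 * PySem.Int.mod N j else 1)]
    split_ifs <;> ring
  · conv_lhs => rw [turnGo, dif_neg h]
    conv_rhs => rw [turnGo, dif_neg h]
    ring
termination_by N.toNat
decreasing_by all_goals exact pv_floordiv_toNat_lt N j h.1 h.2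

theorem turn_zero (b : Int) : turn b 0 = 1 := by
  unfold turn; rw [turnGo, dif_neg (by omega)]

-- one digit step of A's product, in ediv/emod form, valid also at n = 0
theorem turn_rec (b n : Int) (hb : 2 ≤ b) (hn : 0 ≤ n) :
    turn b n = (if n % b ≠ 0 then n % b else 1) * turn b (n / b) := by
  rcases eq_or_lt_of_le hn with h0 | h0
  · rw [← h0]
    simp [turn_zero, Int.zero_emod, Int.zero_ediv]
  · unfold turn
    conv_lhs => rw [turnGo, dif_pos ⟨h0, hb⟩]
    rw [PySem.Int.floordiv_eq_ediv_of_pos (by omega), PySem.Int.mod_eq_emod_of_pos (by omega),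
      turnGo_mul]
    split_ifs <;> ring

theorem turn_pos (j N k : Int) (hj : 2 ≤ j) (hk : 1 ≤ k) : k ≤ turnGo j N k := by
  by_cases h : 0 < N ∧ 2 ≤ j
  · rw [turnGo, dif_pos h]
    have hm0 : 0 ≤ PySem.Int.mod N j := PySem.Int.mod_nonneg N (by omega)
    have hk' : k ≤ if PySem.Int.mod N j ≠ 0 then k * PySem.Int.mod N j else k := by
      split_ifs with hm
      · have hm1 : 1 ≤ PySem.Int.mod N j := by omega
        nlinarith [mul_le_mul_of_nonneg_left hm1 (by omega : (0:Int) ≤ k)]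
      · exact le_rfl
    exact le_trans hk' (turn_pos j (PySem.Int.floordiv N j) _ hj (by omega))
  · rw [turnGo, dif_neg h]
termination_by N.toNat
decreasing_by exact pv_floordiv_toNat_lt N j h.1 h.2

-- stripping the top digit of n multiplies A's product by that digit (if nonzero)
theorem turn_top (b : Int) (hb : 2 ≤ b) : ∀ (k : Nat) (d r : Int), 0 ≤ d → d < b → 0 ≤ r →
    r < b ^ k → turn b (d * b ^ k + r) = (if d ≠ 0 then d else 1) * turn b r := by
  intro k
  induction k with
  | zero =>
    intro d r hd0 hdb hr0 hr1
    have hr : r = 0 := by have := pow_zero b; omega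
    subst hr
    simp only [pow_zero, mul_one, add_zero]
    rcases eq_or_lt_of_le hd0 with h0 | h0
    · rw [← h0]; simp [turn_zero]
    · rw [turn_rec b d hb hd0, Int.emod_eq_of_lt hd0 hdb, Int.ediv_eq_zero_of_lt hd0 hdb,
        turn_zero]
  | succ k ih =>
    intro d r hd0 hdb hr0 hr1
    have hb0 : (0:Int) < b := by omega
    have hbk : (0:Int) < b ^ k := pow_pos hb0 k
    set n := d * b ^ (k+1) + r with hn
    have hn0 : 0 ≤ n := by positivity
    have hmod : n % b = r % b := by
      have : n = r + b * (d * b ^ k) := by rw [hn]; ring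
      rw [this, Int.add_mul_emod_self_left]
    have hdiv : n / b = d * b ^ k + r / b := by
      have : n = r + b * (d * b ^ k) := by rw [hn]; ring
      rw [this, Int.add_mul_ediv_left r (d * b ^ k) (by omega)]
      ring
    have hrdiv0 : 0 ≤ r / b := Int.ediv_nonneg hr0 (by omega)
    have hrdiv1 : r / b < b ^ k := by
      rw [Int.ediv_lt_iff_lt_mul hb0]
      calc r < b ^ (k+1) := hr1
        _ = b ^ k * b := by ring
    rw [turn_rec b n hb hn0, hmod, hdiv, ih d (r / b) hd0 hdb hrdiv0 hrdiv1,
      turn_rec b r hb hr0]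
    ring

-- the first loop of B returns a power of the base with n below its next multiple
theorem powUp_spec (n base p : Int) (hb : 2 ≤ base) :
    ∀ k : Nat, p = base ^ k → ∃ m : Nat, powUp n base p = base ^ m ∧ n < base ^ m * base := by
  intro k hk
  have hbk : (0:Int) < base ^ k := pow_pos (by omega) k
  have hp1 : 1 ≤ p := by omega
  by_cases h : p * base ≤ n
  · rw [powUp, dif_pos ⟨h, hb, hp1⟩]
    exact powUp_spec n base (p * base) hb (k+1) (by rw [hk]; ring)
  · rw [powUp, dif_neg (by tauto)]
    exact ⟨k, hk, by rw [← hk]; omega⟩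
termination_by (n - p).toNat
decreasing_by
  have h2 : p * 2 ≤ p * base := by nlinarith
  omega

-- B's peel loop, started at the power bounding n, computes A's product times its accumulator
theorem peel_spec (base : Int) (hb : 2 ≤ base) :
    ∀ (k : Nat) (n p acc : Int), p = base ^ k → 0 ≤ n → n < p * base →
      peel n p base acc = acc * turn base n := by
  intro k
  induction k with
  | zero =>
    intro n p acc hp hn0 hn1
    have hp1 : p = 1 := by simpa using hp
    subst hp1
    rcases eq_or_lt_of_le hn0 with h0 | h0
    · rw [peel, dif_neg (by omega), ← h0, turn_zero]; ring
    · rw [peel, dif_pos ⟨h0, hb, le_rfl⟩]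
      simp only [PySem.Int.floordiv_eq_ediv_of_pos (show (0:Int) < 1 by omega), Int.ediv_one]
      rw [peel, dif_neg (by omega)]
      have hnne : n ≠ 0 := by omega
      have ht : turn base n = n := by
        rw [turn_rec base n hb hn0, Int.emod_eq_of_lt hn0 (by omega),
          Int.ediv_eq_zero_of_lt hn0 (by omega), turn_zero]
        simp [hnne]
      rw [if_pos hnne, ht]
  | succ k ih =>
    intro n p acc hp hn0 hn1
    have hb0 : (0:Int) < base := by omega
    have hbk : (0:Int) < base ^ k := pow_pos hb0 k
    have hp0 : 0 < p := by rw [hp]; positivity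
    rcases eq_or_lt_of_le hn0 with h0 | h0
    · rw [peel, dif_neg (by omega), ← h0, turn_zero]; ring
    · rw [peel, dif_pos ⟨h0, hb, by omega⟩]
      simp only [PySem.Int.floordiv_eq_ediv_of_pos hp0,
        PySem.Int.floordiv_eq_ediv_of_pos hb0]
      set d := n / p with hd
      set r := n - d * p with hr
      have hrmod : r = n % p := by rw [hr, hd, Int.emod_def]; ring
      have hr0 : 0 ≤ r := by rw [hrmod]; exact Int.emod_nonneg n (by omega)
      have hrp : r < p := by rw [hrmod]; exact Int.emod_lt_of_pos n hp0
      have hd0 : 0 ≤ d := Int.ediv_nonneg hn0 (by omega)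
      have hdb : d < base := by rw [hd, Int.ediv_lt_iff_lt_mul hp0, mul_comm base p]; omega
      have hpq : p / base = base ^ k := by
        rw [hp, pow_succ, Int.mul_ediv_cancel _ (by omega)]
      rw [hpq]
      have hps : p = base ^ k * base := by rw [hp, pow_succ]
      have hlt' : r < base ^ k * base := by rw [← pow_succ]; omega
      have hrec := ih r (base ^ k) (if d ≠ 0 then acc * d else acc) rfl hr0 hlt'
      rw [hrec]
      have hnd : n = d * base ^ (k+1) + r := by rw [hr, hp]; ring
      rw [hnd, turn_top base hb (k+1) d r hd0 hdb hr0 (by omega)]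
      split_ifs <;> ring

theorem digitproduct_eq (N b : Int) (hb : 2 ≤ b) : digitproduct N b = turn b N := by
  by_cases hN : 0 ≤ N
  · obtain ⟨m, hm, hlt⟩ := powUp_spec N b 1 hb 0 (by norm_num)
    unfold digitproduct
    rw [hm, peel_spec b hb m N (b ^ m) 1 rfl hN hlt]
    ring
  · -- N < 0: both the Python programs diverge here; the guarded ports both return 1
    unfold digitproduct
    rw [powUp, dif_neg (by intro h; omega), peel, dif_neg (by intro h; omega)]
    unfold turn
    rw [turnGo, dif_neg (by intro h; omega)]

-- past the first step, A's best-so-far scan and B's max-of-pairs fold keep the same best base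
theorem loop_agree (f : Int → Int) (L : List Int) (j : Int)
    (hj : ∀ x ∈ L, j < x) (hp : L.Pairwise (· < ·)) :
    ∃ p, L.foldl (fun (s : Int × Int) i => if f i ≥ s.2 then (i, f i) else s) (j, f j) = (p, f p) ∧
      (L.map (fun x => (f x, x))).foldl
        (fun (m : Int × Int) y => if m.1 < y.1 ∨ (m.1 = y.1 ∧ m.2 < y.2) then y else m)
        (f j, j) = (f p, p) := by
  induction L generalizing j with
  | nil => exact ⟨j, rfl, rfl⟩
  | cons x t ih =>
    have hjx : j < x := hj x List.mem_cons_self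
    have hxt : ∀ y ∈ t, x < y := fun y hy => (List.pairwise_cons.1 hp).1 y hy
    have hpt : t.Pairwise (· < ·) := (List.pairwise_cons.1 hp).2
    simp only [List.map_cons, List.foldl_cons]
    by_cases hcmp : f j ≤ f x
    · rw [if_pos (show f x ≥ (j, f j).2 from hcmp),
        if_pos (show (f j, j).1 < (f x, x).1 ∨ ((f j, j).1 = (f x, x).1 ∧ (f j, j).2 < (f x, x).2)
          by rcases lt_or_eq_of_le hcmp with h | h
             · exact Or.inl h
             · exact Or.inr ⟨h, hjx⟩)]
      exact ih x hxt hpt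
    · rw [if_neg (show ¬ f x ≥ (j, f j).2 from hcmp),
        if_neg (show ¬ ((f j, j).1 < (f x, x).1 ∨ ((f j, j).1 = (f x, x).1 ∧ (f j, j).2 < (f x, x).2))
          by push_neg; constructor <;> omega)]
      exact ih j (fun y hy => lt_trans hjx (hxt y hy)) hpt

theorem loop_agree0 (f : Int → Int) (L : List Int) (j k0 : Int) (hk0 : k0 ≤ f j)
    (hj : ∀ x ∈ L, j < x) (hp : L.Pairwise (· < ·)) :
    ∃ p, (j :: L).foldl (fun (s : Int × Int) i => if f i ≥ s.2 then (i, f i) else s) (j, k0)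
        = (p, f p) ∧
      (L.map (fun x => (f x, x))).foldl
        (fun (m : Int × Int) y => if m.1 < y.1 ∨ (m.1 = y.1 ∧ m.2 < y.2) then y else m)
        (f j, j) = (f p, p) := by
  obtain ⟨p, h1, h2⟩ := loop_agree f L j hj hp
  refine ⟨p, ?_, h2⟩
  simp only [List.foldl_cons]
  rw [if_pos (show f j ≥ (j, k0).2 from hk0)]
  exact h1

-- ===== VERDICT (by name: the statement is the Claim_ definition above) =====
theorem solution_spec : Claim_equal_solution := by
  intro N _
  unfold Spec_solution solution solution_alt
  have hr : PySem.List.pyRange 2 10 1 = [2, 3, 4, 5, 6, 7, 8, 9] := by decide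
  rw [hr]
  simp only [List.map_cons, List.map_nil, List.tail_cons, List.headI]
  rw [digitproduct_eq N 2 (by norm_num), digitproduct_eq N 3 (by norm_num),
    digitproduct_eq N 4 (by norm_num), digitproduct_eq N 5 (by norm_num),
    digitproduct_eq N 6 (by norm_num), digitproduct_eq N 7 (by norm_num),
    digitproduct_eq N 8 (by norm_num), digitproduct_eq N 9 (by norm_num)]
  obtain ⟨p, hA, hB⟩ := loop_agree0 (fun i => turn i N) [3, 4, 5, 6, 7, 8, 9] 2 0
    (le_trans (by norm_num) (turn_pos 2 N 1 (by norm_num) le_rfl))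
    (by intro x hx; fin_cases hx <;> norm_num) (by decide)
  simp only [List.map_cons, List.map_nil] at hB
  rw [hA, hB]
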